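-- pv_equiv track=rewrite | github.com/ball-lightning6/neural-sculpting-paradigm | to_be_organized/generate_matrix_flip_max_score.py | solve_max_score
-- ===== SOURCE A (Python) =====
-- def solve_max_score(grid):
--     """
--     使用高效的 O(M*N) 贪心算法计算最大得分。
--     """
--     m, n = len(grid), len(grid[0])
--
--     # 步骤1：行翻转 (贪心策略：确保最高位为1)
--     for i in range(m):
--         if grid[i][0]==0:
--             # 翻转这一行
--             for j in range(n):
--                 grid[i][j] = 1 - grid[i][j]
--
--     # 步骤2：列翻转 (贪心策略：确保每一列的1比0多)
--     total_score = 0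
--     for j in range(n):
--         count_ones = sum(grid[i][j] for i in range(m))
--         count_zeros = m - count_ones
--
--         # 如果0更多，翻转这一列更有利
--         # 权重是 2^(n-1-j)
--         weight = 2 ** (n - 1 - j)
--         total_score += max(count_ones, count_zeros) * weight
--
--     return total_score
-- ===== SOURCE B (Python) =====
-- def solve_max_score(grid):
--     # Return-value equivalent to A; unlike A it does NOT flip rows of grid in place.
--     # Each entry x of row i is mapped to s_i*(2*x-1), s_i = -1 iff row starts with 0;
--     # then score = (m*(2**n - 1) + sum_j |column_sum_j| * 2**(n-1-j)) // 2.
--     m = len(grid)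
--     n = len(grid[0])
--     d = [0] * n
--     for row in grid:
--         s = -1 if row[0] == 0 else 1
--         d = [dj + s * (2 * x - 1) for dj, x in zip(d, row)]
--     acc = 0
--     for v in d:
--         acc = acc * 2 + abs(v)
--     return (m * (2 ** n - 1) + acc) // 2
-- ===== Notes on version B (the rewrite author's own statement) =====
-- stated objective: alternative
-- what changed: B never flips anything and computes no per-column max: it maps each entry x of row i to the signed centered value s_i*(2*x-1) (s_i = -1 iff the row starts with 0), accumulates per-column sums of that transform in one row pass, folds the absolute column sums Horner-style, and returns the closed form (m*(2**n-1) + that fold) // 2; A's in-place row flips, per-column one-counting and max(ones, zeros)*2**(n-1-j) accumulation all disappear.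
import Mathlib
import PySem

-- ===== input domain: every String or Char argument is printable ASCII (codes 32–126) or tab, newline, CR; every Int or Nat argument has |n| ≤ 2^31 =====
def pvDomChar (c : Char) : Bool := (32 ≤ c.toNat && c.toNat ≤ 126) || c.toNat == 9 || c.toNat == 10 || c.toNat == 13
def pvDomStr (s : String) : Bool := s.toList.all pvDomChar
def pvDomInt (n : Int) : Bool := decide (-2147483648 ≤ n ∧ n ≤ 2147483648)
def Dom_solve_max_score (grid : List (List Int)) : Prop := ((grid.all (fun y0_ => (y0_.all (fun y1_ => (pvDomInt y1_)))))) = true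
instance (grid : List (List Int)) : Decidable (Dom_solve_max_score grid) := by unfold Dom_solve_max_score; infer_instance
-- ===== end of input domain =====

-- B computes the same score via signed centered values s_i*(2x-1) and the closed form
-- (m*(2^n-1) + Horner fold of |column sums|) // 2, with no flips and no per-column max;
-- equivalence is about the RETURN value only: A flips rows of `grid` in place, B never mutates it.

-- ===== PORT A =====
def pvFlipRowA (row : List Int) (n : Int) : List Int :=
  (PySem.List.pyRange 0 n 1).foldl
    (fun r j => PySem.List.pySetD r j (1 - PySem.List.pyGetD r j 0)) row

def solve_max_score (grid : List (List Int)) : Int :=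
  let m : Int := grid.length
  let n : Int := (PySem.List.pyGetD grid 0 []).length
  let grid2 := (PySem.List.pyRange 0 m 1).foldl
    (fun g i =>
      if PySem.List.pyGetD (PySem.List.pyGetD g i []) 0 0 = 0 then
        PySem.List.pySetD g i (pvFlipRowA (PySem.List.pyGetD g i []) n)
      else g) grid
  (PySem.List.pyRange 0 n 1).foldl
    (fun total_score j =>
      let count_ones :=
        ((PySem.List.pyRange 0 m 1).map
          (fun i => PySem.List.pyGetD (PySem.List.pyGetD grid2 i []) j 0)).sum
      let count_zeros := m - count_ones
      let weight : Int := 2 ^ (n - 1 - j).toNat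
      total_score + max count_ones count_zeros * weight) 0

-- ===== PORT B =====
def solve_max_score_alt (grid : List (List Int)) : Int :=
  let m : Int := grid.length
  let n : Nat := (PySem.List.pyGetD grid 0 []).length
  let d := grid.foldl
    (fun d row =>
      let s : Int := if PySem.List.pyGetD row 0 0 == 0 then -1 else 1
      (d.zip row).map (fun p => p.1 + s * (2 * p.2 - 1))) (List.replicate n 0)
  let acc := d.foldl (fun t v => t * 2 + |v|) 0
  PySem.Int.floordiv (m * (2 ^ n - 1) + acc) 2

-- ===== PRECONDITION & SPEC =====
-- Pre_ excludes exactly the inputs on which A raises IndexError: the empty grid (grid[0]),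
-- a grid whose first row is empty (grid[i][0] on row 0), and grids with some row shorter
-- than the first row (grid[i][0] / grid[i][j] out of range).
def Pre_solve_max_score (grid : List (List Int)) : Prop :=
  grid ≠ [] ∧ 1 ≤ (grid.headD []).length ∧
    ∀ row ∈ grid, (grid.headD []).length ≤ row.length
instance (grid : List (List Int)) : Decidable (Pre_solve_max_score grid) := by
  unfold Pre_solve_max_score; infer_instance

def pvWitness_solve_max_score : List (List Int) := [[0, 1], [1, 0]]

def Spec_solve_max_score (grid : List (List Int)) (out : Int) : Prop := out = solve_max_score_alt grid
instance (grid : List (List Int)) (out : Int) : Decidable (Spec_solve_max_score grid out) := by unfold Spec_solve_max_score; infer_instance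

-- ===== CLAIM (what is proved, stated in full; the proofs are below) =====
def Claim_equal_solve_max_score : Prop := ∀ (grid : List (List Int)), Dom_solve_max_score grid → Pre_solve_max_score grid → Spec_solve_max_score grid (solve_max_score grid)

-- ===== LEMMAS AND PROOFS =====

-- effective column sum after A's virtual row flips
def pvC (grid : List (List Int)) (j : Nat) : Int :=
  (grid.map (fun row => if row.getD 0 0 = 0 then 1 - row.getD j 0 else row.getD j 0)).sum

theorem pvFlipRowA_take : ∀ (k : Nat) (pre rest : List Int), k ≤ rest.length →
    (PySem.List.pyRange (pre.length) (pre.length + k) 1).foldl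
      (fun r j => PySem.List.pySetD r j (1 - PySem.List.pyGetD r j 0)) (pre ++ rest)
    = pre ++ (rest.take k).map (fun x => 1 - x) ++ rest.drop k := by
  intro k
  induction k with
  | zero => intro pre rest _; simp [PySem.List.pyRange_one_eq_nil]
  | succ k ih =>
    intro pre rest hk
    cases rest with
    | nil => simp at hk
    | cons x rest' =>
      rw [PySem.List.pyRange_one_cons (by push_cast; omega)]
      simp only [List.foldl_cons]
      have h1 : PySem.List.pyGetD (pre ++ x :: rest') (pre.length : Int) 0 = x := by
        simp [List.getD]
      have h2 : PySem.List.pySetD (pre ++ x :: rest') (pre.length : Int) (1 - x)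
          = pre ++ (1 - x) :: rest' := by simp
      rw [h1, h2]
      have h3 : ((pre.length : Int) + 1) = ((pre ++ [1 - x]).length : Int) := by
        simp
      have h4 : (pre.length : Int) + (k + 1 : Nat) = ((pre ++ [1-x]).length : Int) + k := by
        simp
        omega
      rw [h3, h4]
      have h5 : pre ++ (1 - x) :: rest' = (pre ++ [1 - x]) ++ rest' := by simp
      rw [h5, ih (pre ++ [1 - x]) rest' (by simpa using Nat.succ_le_succ_iff.mp hk)]
      simp

theorem pvFlipRowA_eq (row : List Int) (n : Nat) (hn : n ≤ row.length) :
    pvFlipRowA row (n : Int) = (row.take n).map (fun x => 1 - x) ++ row.drop n := by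
  have := pvFlipRowA_take n [] row hn
  simpa [pvFlipRowA] using this

theorem pvStep1_eq (n : Int) : ∀ (suf pre : List (List Int)),
    (PySem.List.pyRange (pre.length) (pre.length + suf.length) 1).foldl
      (fun g i =>
        if PySem.List.pyGetD (PySem.List.pyGetD g i []) 0 0 = 0 then
          PySem.List.pySetD g i (pvFlipRowA (PySem.List.pyGetD g i []) n)
        else g) (pre ++ suf)
    = pre ++ suf.map (fun row => if row.getD 0 0 = 0 then pvFlipRowA row n else row) := by
  intro suf
  induction suf with
  | nil => intro pre; simp [PySem.List.pyRange_one_eq_nil]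
  | cons row suf' ih =>
    intro pre
    rw [PySem.List.pyRange_one_cons (by push_cast [List.length_cons]; omega)]
    simp only [List.foldl_cons]
    have h1 : PySem.List.pyGetD (pre ++ row :: suf') (pre.length : Int) [] = row := by
      simp [List.getD]
    rw [h1]
    have h0 : PySem.List.pyGetD row 0 0 = row.getD 0 0 := PySem.List.pyGetD_zero row 0
    rw [h0]
    by_cases hc : row.getD 0 0 = 0
    · rw [if_pos hc]
      have h2 : PySem.List.pySetD (pre ++ row :: suf') (pre.length : Int) (pvFlipRowA row n)
          = (pre ++ [pvFlipRowA row n]) ++ suf' := by simp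
      rw [h2]
      have h4 : (pre.length : Int) + (row :: suf').length
          = ((pre ++ [pvFlipRowA row n]).length : Int) + suf'.length := by simp; omega
      have h3 : ((pre.length : Int) + 1) = ((pre ++ [pvFlipRowA row n]).length : Int) := by simp
      rw [h4, h3, ih]
      simp only [List.map_cons, if_pos hc, List.append_assoc, List.singleton_append]
    · rw [if_neg hc]
      have h4 : (pre.length : Int) + (row :: suf').length
          = ((pre ++ [row]).length : Int) + suf'.length := by simp; omega
      have h3 : ((pre.length : Int) + 1) = ((pre ++ [row]).length : Int) := by simp
      have h5 : pre ++ row :: suf' = (pre ++ [row]) ++ suf' := by simp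
      rw [h4, h3, h5, ih]
      simp only [List.map_cons, if_neg hc, List.append_assoc, List.singleton_append]

theorem pvStep1_zero (n : Int) (g : List (List Int)) :
    (PySem.List.pyRange 0 (g.length) 1).foldl
      (fun gg i =>
        if PySem.List.pyGetD (PySem.List.pyGetD gg i []) 0 0 = 0 then
          PySem.List.pySetD gg i (pvFlipRowA (PySem.List.pyGetD gg i []) n)
        else gg) g
    = g.map (fun row => if row.getD 0 0 = 0 then pvFlipRowA row n else row) := by
  have := pvStep1_eq n g []
  simpa using this

theorem pvFlip_getD (row : List Int) (N j : Nat) (hj : j < N) (hN : N ≤ row.length) :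
    ((row.take N).map (fun x => 1 - x) ++ row.drop N).getD j 0 = 1 - row.getD j 0 := by
  have hjr : j < row.length := lt_of_lt_of_le hj hN
  rw [List.getD_eq_getElem _ 0 (by simp; omega), List.getD_eq_getElem _ 0 hjr]
  rw [List.getElem_append_left (by simp; omega)]
  simp [List.getElem_take]

theorem pvZip_step (k : Int → Int) (n : Nat) (f : Nat → Int) (row : List Int) (hn : n ≤ row.length) :
    ((((List.range n).map f).zip row).map (fun p => p.1 + k p.2))
      = (List.range n).map (fun j => f j + k (row.getD j 0)) := by
  apply List.ext_getElem
  · simp; omega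
  · intro j h1 h2
    simp only [List.getElem_map, List.getElem_zip, List.getElem_range]
    rw [List.getD_eq_getElem row 0 (by simp at h1 ⊢; omega)]

theorem pvSums_eq (n : Nat) (t : List Int → Int → Int) :
    ∀ (rows : List (List Int)) (f : Nat → Int), (∀ row ∈ rows, n ≤ row.length) →
    rows.foldl (fun sums row =>
        ((sums.zip row).map (fun p => p.1 + t row p.2)))
      ((List.range n).map f)
    = (List.range n).map (fun j =>
        f j + (rows.map (fun row => t row (row.getD j 0))).sum) := by
  intro rows
  induction rows with
  | nil => intro f _; simp
  | cons row rows' ih =>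
    intro f hlen
    simp only [List.foldl_cons]
    rw [pvZip_step (t row) n f row (hlen row (by simp))]
    rw [ih (fun j => f j + t row (row.getD j 0))
        (fun r hr => hlen r (by simp [hr]))]
    simp [add_assoc]

theorem pvHorner (w : Int → Int) :
    ∀ (vs : List Int) (acc : Int),
    vs.foldl (fun t v => t * 2 + w v) acc
      = acc * 2 ^ vs.length
        + ((List.range vs.length).map
            (fun j => w (vs.getD j 0) * 2 ^ (vs.length - 1 - j))).sum := by
  intro vs
  induction vs with
  | nil => intro acc; simp
  | cons v vs' ih =>
    intro acc
    simp only [List.foldl_cons, List.length_cons]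
    rw [ih (acc * 2 + w v)]
    rw [List.range_succ_eq_map]
    simp only [List.map_cons, List.map_map, List.sum_cons]
    rw [show ((fun j => w ((v :: vs').getD j 0) * 2 ^ (vs'.length + 1 - 1 - j)) ∘ Nat.succ) = (fun j => w ((v :: vs').getD (Nat.succ j) 0) * 2 ^ (vs'.length + 1 - 1 - (Nat.succ j))) from rfl]
    have h1 : ((List.range vs'.length).map (fun j => w ((v :: vs').getD (Nat.succ j) 0) * 2 ^ (vs'.length + 1 - 1 - (Nat.succ j)))) = (List.range vs'.length).map (fun j => w (vs'.getD j 0) * 2 ^ (vs'.length - 1 - j)) := by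
      apply List.map_congr_left
      intro j hj
      congr 2
      omega
    rw [h1]
    simp [List.getD]
    ring

theorem pvMapMapRange (xs : List (List Int)) (G : List Int → Int) :
    (PySem.List.pyRange 0 (xs.length : Int) 1).map (fun i => G (PySem.List.pyGetD xs i [])) = xs.map G := by
  calc (PySem.List.pyRange 0 (xs.length : Int) 1).map (fun i => G (PySem.List.pyGetD xs i []))
      = ((PySem.List.pyRange 0 (xs.length : Int) 1).map (fun i => PySem.List.pyGetD xs i [])).map G := by
        rw [List.map_map]; exact List.map_congr_left (fun a _ => rfl)
    _ = xs.map G := by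
        have h := PySem.List.map_pyGetD_pyRange_zero xs ([] : List Int)
        rw [show PySem.List.len xs = (xs.length : Int) from rfl] at h
        rw [h]

theorem pvA_eq (r : List Int) (rest : List (List Int))
    (hlen : ∀ row ∈ r :: rest, r.length ≤ row.length) :
    solve_max_score (r :: rest)
      = ((List.range r.length).map (fun j =>
          max (pvC (r :: rest) j) (((r :: rest).length : Int) - pvC (r :: rest) j)
            * 2 ^ (r.length - 1 - j))).sum := by
  simp only [solve_max_score]
  have hget0 : PySem.List.pyGetD (r :: rest) 0 [] = r := by
    rw [PySem.List.pyGetD_zero]; rfl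
  rw [hget0, pvStep1_zero]
  rw [PySem.List.foldl_add]
  rw [PySem.List.pyRange_one 0 (r.length : Int)]
  simp only [Int.sub_zero, Int.toNat_natCast, List.map_map, zero_add]
  congr 1
  simp only [Function.comp_def]
  apply List.map_congr_left
  intro j hj
  have hjN : j < r.length := List.mem_range.mp hj
  have hm : ((r :: rest).length : Int)
      = ((((r :: rest).map (fun row => if row.getD 0 0 = 0 then pvFlipRowA row (r.length : Int) else row)).length : Int)) := by
    simp
  have hcnt := pvMapMapRange
    ((r :: rest).map (fun row => if row.getD 0 0 = 0 then pvFlipRowA row (r.length : Int) else row))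
    (fun row => PySem.List.pyGetD row ((j : Nat) : Int) 0)
  rw [hm, hcnt, List.map_map]
  have hrow : ∀ row ∈ r :: rest,
      ((fun row => PySem.List.pyGetD row ((j : Nat) : Int) 0) ∘
        (fun row => if row.getD 0 0 = 0 then pvFlipRowA row (r.length : Int) else row)) row
      = (if row.getD 0 0 = 0 then 1 - row.getD j 0 else row.getD j 0) := by
    intro row hr
    simp only [Function.comp_def]
    by_cases hc : row.getD 0 0 = 0
    · rw [if_pos hc, if_pos hc, pvFlipRowA_eq row r.length (hlen row hr),
        PySem.List.pyGetD_natCast, pvFlip_getD row r.length j hjN (hlen row hr)]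
    · rw [if_neg hc, if_neg hc, PySem.List.pyGetD_natCast]
  rw [List.map_congr_left hrow]
  have hexp : (((r.length : Int)) - 1 - (j : Int)).toNat = r.length - 1 - j := by omega
  rw [hexp]
  rfl

-- sum of the signed centered column values = 2 * (effective column sum) - m
theorem pvDsum (j : Nat) : ∀ (rows : List (List Int)),
    (rows.map (fun row =>
        (if PySem.List.pyGetD row 0 0 == 0 then (-1 : Int) else 1) * (2 * row.getD j 0 - 1))).sum
      = 2 * pvC rows j - rows.length := by
  intro rows
  induction rows with
  | nil => simp [pvC]
  | cons row rest ih =>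
    simp only [List.map_cons, List.sum_cons, pvC] at ih ⊢
    rw [ih, PySem.List.pyGetD_zero]
    by_cases hc : row.getD 0 0 = 0
    · rw [if_pos (by simpa [beq_iff_eq] using hc), if_pos hc]
      simp only [List.length_cons]; push_cast; ring
    · rw [if_neg (by simpa [beq_iff_eq] using hc), if_neg hc]
      simp only [List.length_cons]; push_cast; ring

theorem pvPowSum : ∀ (n : Nat),
    ((List.range n).map (fun j => (2 : Int) ^ (n - 1 - j))).sum = 2 ^ n - 1 := by
  intro n
  induction n with
  | zero => simp
  | succ n ih =>
    rw [List.range_succ_eq_map]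
    simp only [List.map_cons, List.sum_cons, List.map_map]
    have h1 : ((fun j => (2 : Int) ^ (n + 1 - 1 - j)) ∘ Nat.succ)
        = fun j => (2 : Int) ^ (n - 1 - j) := by
      funext j
      have he : n + 1 - 1 - Nat.succ j = n - 1 - j := by omega
      simp only [Function.comp_apply, he]
    rw [h1, ih]
    have h2 : n + 1 - 1 - 0 = n := by omega
    rw [h2]; ring

theorem pvB_eq (r : List Int) (rest : List (List Int))
    (hlen : ∀ row ∈ r :: rest, r.length ≤ row.length) :
    solve_max_score_alt (r :: rest)
      = PySem.Int.floordiv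
          (((r :: rest).length : Int) * (2 ^ r.length - 1)
            + ((List.range r.length).map (fun j =>
                |2 * pvC (r :: rest) j - ((r :: rest).length : Int)|
                  * 2 ^ (r.length - 1 - j))).sum) 2 := by
  simp only [solve_max_score_alt]
  have hget0 : PySem.List.pyGetD (r :: rest) 0 [] = r := by
    rw [PySem.List.pyGetD_zero]; rfl
  rw [hget0]
  have hrep : List.replicate r.length (0 : Int) = (List.range r.length).map (fun _ => (0 : Int)) := by
    simp
  rw [hrep]
  rw [pvSums_eq r.length
      (fun row x => (if PySem.List.pyGetD row 0 0 == 0 then (-1 : Int) else 1) * (2 * x - 1))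
      (r :: rest) (fun _ => 0) hlen]
  rw [pvHorner (fun v => |v|)]
  simp only [List.length_map, List.length_range, zero_mul, zero_add]
  have hmap : (List.range r.length).map
      (fun j => |((List.range r.length).map (fun j =>
          ((r :: rest).map (fun row =>
            (if PySem.List.pyGetD row 0 0 == 0 then (-1 : Int) else 1) * (2 * row.getD j 0 - 1))).sum)).getD j 0|
        * 2 ^ (r.length - 1 - j))
    = (List.range r.length).map
      (fun j => |2 * pvC (r :: rest) j - ((r :: rest).length : Int)| * 2 ^ (r.length - 1 - j)) := by
    apply List.map_congr_left
    intro j hj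
    have hjN : j < r.length := List.mem_range.mp hj
    have hgd : ((List.range r.length).map (fun j =>
        ((r :: rest).map (fun row =>
          (if PySem.List.pyGetD row 0 0 == 0 then (-1 : Int) else 1) * (2 * row.getD j 0 - 1))).sum)).getD j 0
      = ((r :: rest).map (fun row =>
          (if PySem.List.pyGetD row 0 0 == 0 then (-1 : Int) else 1) * (2 * row.getD j 0 - 1))).sum := by
      rw [List.getD_eq_getElem _ _ (by simp; omega)]
      simp
    rw [hgd, pvDsum j (r :: rest)]
  rw [hmap]

-- ===== VERDICT (by name: the statement is the Claim_ definition above) =====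
theorem solve_max_score_spec : Claim_equal_solve_max_score := by
  intro grid _ hpre
  unfold Spec_solve_max_score
  obtain ⟨hne, _, hlen⟩ := hpre
  cases grid with
  | nil => exact absurd rfl hne
  | cons r rest =>
    have hlen' : ∀ row ∈ r :: rest, r.length ≤ row.length := by
      intro row hr; simpa using hlen row hr
    rw [pvA_eq r rest hlen', pvB_eq r rest hlen']
    set m : Int := ((r :: rest).length : Int) with hm
    set n : Nat := r.length with hn
    have hkey : m * (2 ^ n - 1)
        + ((List.range n).map (fun j => |2 * pvC (r :: rest) j - m| * 2 ^ (n - 1 - j))).sum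
        = 2 * ((List.range n).map (fun j =>
            max (pvC (r :: rest) j) (m - pvC (r :: rest) j) * 2 ^ (n - 1 - j))).sum := by
      rw [← List.sum_map_mul_left]
      have hpt : ∀ j ∈ List.range n,
          (2 : Int) * (max (pvC (r :: rest) j) (m - pvC (r :: rest) j) * 2 ^ (n - 1 - j))
          = m * 2 ^ (n - 1 - j) + |2 * pvC (r :: rest) j - m| * 2 ^ (n - 1 - j) := by
        intro j _
        have h2max : (2 : Int) * max (pvC (r :: rest) j) (m - pvC (r :: rest) j)
            = m + |2 * pvC (r :: rest) j - m| := by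
          rcases abs_cases (2 * pvC (r :: rest) j - m) with ⟨h1, h2⟩ | ⟨h1, h2⟩ <;>
            rcases max_cases (pvC (r :: rest) j) (m - pvC (r :: rest) j) with ⟨h3, h4⟩ | ⟨h3, h4⟩ <;>
            omega
        calc (2 : Int) * (max (pvC (r :: rest) j) (m - pvC (r :: rest) j) * 2 ^ (n - 1 - j))
            = (2 * max (pvC (r :: rest) j) (m - pvC (r :: rest) j)) * 2 ^ (n - 1 - j) := by ring
          _ = (m + |2 * pvC (r :: rest) j - m|) * 2 ^ (n - 1 - j) := by rw [h2max]
          _ = m * 2 ^ (n - 1 - j) + |2 * pvC (r :: rest) j - m| * 2 ^ (n - 1 - j) := by ring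
      rw [List.map_congr_left hpt, List.sum_map_add, List.sum_map_mul_left, pvPowSum]
    rw [hkey]
    rw [PySem.Int.floordiv_eq_ediv_of_pos (by norm_num)]
    omega
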